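-- pv_equiv track=rewrite | github.com/kevin-goulding/AdventOfCode | 2015day21.py | highestLossCost
-- ===== SOURCE A (Python) =====
-- def battle(pHp, pDam, pArm, eHp, eDam, eArm):
--     playerHP = pHp
--     enemyHP = eHp
--     pDamDealt = pDam - eArm
--     if pDamDealt <= 1:
--         pDamDealt = 1
--     eDamDealt = eDam - pArm
--     if eDamDealt <= 1:
--         eDamDealt = 1
--     while playerHP > 0 and enemyHP >0:
--         enemyHP -= pDamDealt
--         if enemyHP <= 0:
--             return(True)
--         playerHP -= eDamDealt
--         if playerHP <=0:
--             return(False)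
--
-- def highestLossCost(weaponDict, armorDict, ringDict, eHp, eDam, eArm, pHp, pDam, pArm):
--     highestLossCost = 0
--     for weapon in weaponDict:
--         for armor in armorDict:
--             for ring1 in ringDict:
--                 for ring2 in ringDict:
--                     if ring1 != ring2:
--                         if battle(pHp, pDam+weaponDict[weapon][1]+ringDict[ring1][1]+ringDict[ring2][1], pArm+armorDict[armor][2]+ringDict[ring1][2]+ringDict[ring2][2], eHp, eDam, eArm) == False:
--                             cost = weaponDict[weapon][0]+armorDict[armor][0]+ringDict[ring1][0]+ringDict[ring2][0]
--                             if cost > highestLossCost: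
--                                 highestLossCost = cost
--     return(highestLossCost)
-- ===== SOURCE B (Python) =====
-- def highestLossCost(weaponDict, armorDict, ringDict, eHp, eDam, eArm, pHp, pDam, pArm):
--     if pHp <= 0 or eHp <= 0 or not weaponDict or not armorDict or len(ringDict) < 2:
--         return 0
--     ring_pairs = [(r1[0] + r2[0], r1[1] + r2[1], r1[2] + r2[2])
--                   for k1, r1 in ringDict.items()
--                   for k2, r2 in ringDict.items()
--                   if k1 != k2]
--     rp_costs = [rc for rc, _, _ in ring_pairs]
--     # rounds the player needs to kill the enemy, per (weapon, ring pair)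
--     weapons_rk = [(v[0], [-(-eHp // max(pDam + v[1] + rdam - eArm, 1)) for _, rdam, _ in ring_pairs])
--                   for v in weaponDict.values()]
--     # rounds the player survives, per (armor, ring pair)
--     armors_rs = [(v[0], [-(-pHp // max(eDam - pArm - v[2] - rarm, 1)) for _, _, rarm in ring_pairs])
--                  for v in armorDict.values()]
--     best = 0
--     for wcost, rk_row in weapons_rk:
--         for acost, rs_row in armors_rs:
--             base = wcost + acost
--             for rc, rk, rs in zip(rp_costs, rk_row, rs_row):
--                 if rk > rs:
--                     c = base + rc
--                     if c > best:
--                         best = c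
--     return best
-- ===== Notes on version B (the rewrite author's own statement) =====
-- stated objective: faster
-- what changed: Replaces the round-by-round battle simulation with a closed-form ceiling-division comparison of rounds-to-kill vs rounds-survived (player strikes first), precomputes the flattened distinct-ring-pair list and the per-(weapon,ring-pair) and per-(armor,ring-pair) round counts outside the triple loop, and hoists the constant alive-and-full-combo-exists check out of the loops.
import Mathlib
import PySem

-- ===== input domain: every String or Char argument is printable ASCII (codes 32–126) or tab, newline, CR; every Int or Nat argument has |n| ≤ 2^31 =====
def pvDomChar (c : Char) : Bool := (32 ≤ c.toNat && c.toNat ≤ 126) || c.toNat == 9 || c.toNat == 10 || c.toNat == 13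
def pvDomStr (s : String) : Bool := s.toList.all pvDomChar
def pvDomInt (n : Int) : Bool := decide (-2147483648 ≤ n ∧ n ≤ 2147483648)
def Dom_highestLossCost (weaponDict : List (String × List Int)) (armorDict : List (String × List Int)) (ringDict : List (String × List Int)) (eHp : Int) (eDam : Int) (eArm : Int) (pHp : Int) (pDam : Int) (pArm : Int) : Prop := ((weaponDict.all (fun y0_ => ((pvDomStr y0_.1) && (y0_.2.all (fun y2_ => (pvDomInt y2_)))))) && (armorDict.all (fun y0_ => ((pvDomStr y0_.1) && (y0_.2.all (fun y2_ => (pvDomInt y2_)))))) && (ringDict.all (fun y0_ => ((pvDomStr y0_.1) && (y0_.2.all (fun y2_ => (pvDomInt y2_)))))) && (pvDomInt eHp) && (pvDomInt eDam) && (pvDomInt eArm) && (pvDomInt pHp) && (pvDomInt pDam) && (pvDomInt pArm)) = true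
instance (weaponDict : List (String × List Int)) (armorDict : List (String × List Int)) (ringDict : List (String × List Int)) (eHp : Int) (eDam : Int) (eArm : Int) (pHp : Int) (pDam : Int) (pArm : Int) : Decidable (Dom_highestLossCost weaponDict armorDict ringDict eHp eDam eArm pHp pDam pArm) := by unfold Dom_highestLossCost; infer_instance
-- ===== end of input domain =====

-- B replaces A's round-by-round battle simulation with a closed-form ceiling-division
-- comparison of rounds-to-kill vs rounds-survived, precomputed per (weapon, ring pair)
-- and (armor, ring pair) outside the triple loop (objective: faster, measured).

-- ===== PORT A =====

-- xs[i] for a nonnegative literal index; Python raises IndexError when i is out of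
-- range — exactly those inputs are excluded by Pre_ (the default 0 is never used there)
def pyIdx (xs : List Int) (i : Int) : Int := PySem.List.pyGetD xs i 0

-- the while loop of battle; terminates because eDD ≥ 1 strictly shrinks playerHP
def battleLoop (pDD eDD : Int) (playerHP enemyHP : Int) (he : 1 ≤ eDD) : Option Bool :=
  if _h : playerHP > 0 ∧ enemyHP > 0 then
    if enemyHP - pDD ≤ 0 then some true
    else if playerHP - eDD ≤ 0 then some false
    else battleLoop pDD eDD (playerHP - eDD) (enemyHP - pDD) he
  else none
termination_by playerHP.toNat
decreasing_by omega

-- battle falls off the loop (returns None) when a fighter starts dead: Option Bool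
def battle (pHp pDam pArm eHp eDam eArm : Int) : Option Bool :=
  battleLoop (if pDam - eArm ≤ 1 then 1 else pDam - eArm)
             (if eDam - pArm ≤ 1 then 1 else eDam - pArm)
             pHp eHp (by split <;> omega)

def highestLossCost (weaponDict : List (String × List Int)) (armorDict : List (String × List Int)) (ringDict : List (String × List Int)) (eHp : Int) (eDam : Int) (eArm : Int) (pHp : Int) (pDam : Int) (pArm : Int) : Int :=
  (PySem.Dict.keys (PySem.Dict.mk weaponDict)).foldl (fun best weapon =>
    (PySem.Dict.keys (PySem.Dict.mk armorDict)).foldl (fun best armor =>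
      (PySem.Dict.keys (PySem.Dict.mk ringDict)).foldl (fun best ring1 =>
        (PySem.Dict.keys (PySem.Dict.mk ringDict)).foldl (fun best ring2 =>
          if ring1 ≠ ring2 then
            if battle pHp
                 (pDam + pyIdx ((PySem.Dict.mk weaponDict).getD weapon []) 1
                       + pyIdx ((PySem.Dict.mk ringDict).getD ring1 []) 1
                       + pyIdx ((PySem.Dict.mk ringDict).getD ring2 []) 1)
                 (pArm + pyIdx ((PySem.Dict.mk armorDict).getD armor []) 2
                       + pyIdx ((PySem.Dict.mk ringDict).getD ring1 []) 2
                       + pyIdx ((PySem.Dict.mk ringDict).getD ring2 []) 2)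
                 eHp eDam eArm = some false then
              let cost := pyIdx ((PySem.Dict.mk weaponDict).getD weapon []) 0
                        + pyIdx ((PySem.Dict.mk armorDict).getD armor []) 0
                        + pyIdx ((PySem.Dict.mk ringDict).getD ring1 []) 0
                        + pyIdx ((PySem.Dict.mk ringDict).getD ring2 []) 0
              if cost > best then cost else best
            else best
          else best) best) best) best) 0

-- ===== PORT B =====

-- -(-a // b) of Source B (ceiling division for positive b)
def ceilDiv (a b : Int) : Int := -(PySem.Int.floordiv (-a) b)

def highestLossCost_alt (weaponDict : List (String × List Int)) (armorDict : List (String × List Int)) (ringDict : List (String × List Int)) (eHp : Int) (eDam : Int) (eArm : Int) (pHp : Int) (pDam : Int) (pArm : Int) : Int :=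
  if pHp ≤ 0 ∨ eHp ≤ 0 ∨ weaponDict = [] ∨ armorDict = [] ∨ ringDict.length < 2 then 0
  else
    let ringPairs := ((PySem.Dict.mk ringDict).items).flatMap (fun kr1 =>
      (((PySem.Dict.mk ringDict).items).filter (fun kr2 => kr1.1 != kr2.1)).map (fun kr2 =>
        (pyIdx kr1.2 0 + pyIdx kr2.2 0, pyIdx kr1.2 1 + pyIdx kr2.2 1,
         pyIdx kr1.2 2 + pyIdx kr2.2 2)))
    let rpCosts := ringPairs.map (fun rp => rp.1)
    let weaponsRk := (PySem.Dict.values (PySem.Dict.mk weaponDict)).map (fun v =>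
      (pyIdx v 0, ringPairs.map (fun rp => ceilDiv eHp (max (pDam + pyIdx v 1 + rp.2.1 - eArm) 1))))
    let armorsRs := (PySem.Dict.values (PySem.Dict.mk armorDict)).map (fun v =>
      (pyIdx v 0, ringPairs.map (fun rp => ceilDiv pHp (max (eDam - pArm - pyIdx v 2 - rp.2.2) 1))))
    weaponsRk.foldl (fun best wr =>
      armorsRs.foldl (fun best ar =>
        let base := wr.1 + ar.1
        (rpCosts.zip (wr.2.zip ar.2)).foldl (fun best t =>
          if t.2.1 > t.2.2 then
            let c := base + t.1
            if c > best then c else best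
          else best) best) best) 0

-- ===== PRECONDITION & SPEC =====

-- Pre_ excludes (a) association lists with duplicate keys, which do not represent a
-- Python dict (a dict cannot hold duplicate keys), and (b) exactly the inputs where A
-- raises IndexError: when all four loops reach the stat indexing (all dicts usable),
-- some stat list is too short (weapons need indices 0..1, armor and rings 0..2).
def Pre_highestLossCost (weaponDict : List (String × List Int)) (armorDict : List (String × List Int)) (ringDict : List (String × List Int)) (eHp : Int) (eDam : Int) (eArm : Int) (pHp : Int) (pDam : Int) (pArm : Int) : Prop :=
  (weaponDict.map Prod.fst).Nodup ∧ (armorDict.map Prod.fst).Nodup ∧ (ringDict.map Prod.fst).Nodup ∧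
  (weaponDict ≠ [] → armorDict ≠ [] → 2 ≤ ringDict.length →
    ((∀ p ∈ weaponDict, 2 ≤ p.2.length) ∧ (∀ p ∈ armorDict, 3 ≤ p.2.length) ∧
     (∀ p ∈ ringDict, 3 ≤ p.2.length)))
instance (weaponDict : List (String × List Int)) (armorDict : List (String × List Int)) (ringDict : List (String × List Int)) (eHp : Int) (eDam : Int) (eArm : Int) (pHp : Int) (pDam : Int) (pArm : Int) : Decidable (Pre_highestLossCost weaponDict armorDict ringDict eHp eDam eArm pHp pDam pArm) := by unfold Pre_highestLossCost; infer_instance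

def pvWitness_highestLossCost : (List (String × List Int)) × (List (String × List Int)) × (List (String × List Int)) × Int × Int × Int × Int × Int × Int :=
  ([("a", [8, 4, 0])], [("b", [13, 0, 1])], [("c", [25, 1, 0]), ("d", [50, 2, 0])],
   100, 8, 2, 100, 0, 0)

def Spec_highestLossCost (weaponDict : List (String × List Int)) (armorDict : List (String × List Int)) (ringDict : List (String × List Int)) (eHp : Int) (eDam : Int) (eArm : Int) (pHp : Int) (pDam : Int) (pArm : Int) (out : Int) : Prop := out = highestLossCost_alt weaponDict armorDict ringDict eHp eDam eArm pHp pDam pArm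
instance (weaponDict : List (String × List Int)) (armorDict : List (String × List Int)) (ringDict : List (String × List Int)) (eHp : Int) (eDam : Int) (eArm : Int) (pHp : Int) (pDam : Int) (pArm : Int) (out : Int) : Decidable (Spec_highestLossCost weaponDict armorDict ringDict eHp eDam eArm pHp pDam pArm out) := by unfold Spec_highestLossCost; infer_instance

-- ===== CLAIM (what is proved, stated in full; the proofs are below) =====
def Claim_equal_highestLossCost : Prop := ∀ (weaponDict : List (String × List Int)) (armorDict : List (String × List Int)) (ringDict : List (String × List Int)) (eHp : Int) (eDam : Int) (eArm : Int) (pHp : Int) (pDam : Int) (pArm : Int), Dom_highestLossCost weaponDict armorDict ringDict eHp eDam eArm pHp pDam pArm → Pre_highestLossCost weaponDict armorDict ringDict eHp eDam eArm pHp pDam pArm → Spec_highestLossCost weaponDict armorDict ringDict eHp eDam eArm pHp pDam pArm (highestLossCost weaponDict armorDict ringDict eHp eDam eArm pHp pDam pArm)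

-- ===== LEMMAS AND PROOFS =====

theorem ceilDiv_bracket (a b : Int) (hb : 0 < b) :
    (ceilDiv a b - 1) * b < a ∧ a ≤ ceilDiv a b * b :=
  (PySem.Int.neg_floordiv_neg_eq_iff_of_pos (a := a) (b := b) (q := ceilDiv a b) hb).mp rfl

theorem ceilDiv_shift (a b : Int) (hb : 0 < b) : ceilDiv (a - b) b = ceilDiv a b - 1 := by
  have h := ceilDiv_bracket a b hb
  exact (PySem.Int.neg_floordiv_neg_eq_iff_of_pos hb).mpr (by constructor <;> nlinarith [h.1, h.2])

theorem ceilDiv_eq_one (a b : Int) (h0 : 0 < a) (hab : a ≤ b) : ceilDiv a b = 1 :=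
  (PySem.Int.neg_floordiv_neg_eq_iff_of_pos (by omega)).mpr (by constructor <;> nlinarith)

theorem ceilDiv_pos (a b : Int) (h0 : 0 < a) (hb : 0 < b) : 1 ≤ ceilDiv a b := by
  have h := ceilDiv_bracket a b hb
  nlinarith [h.1, h.2]

theorem ceilDiv_ge_two (a b : Int) (hb : 0 < b) (h : b < a) : 2 ≤ ceilDiv a b := by
  have hh := ceilDiv_bracket a b hb
  nlinarith [hh.1, hh.2]

theorem battleLoop_false_iff (pDD eDD p e : Int) (hp : 1 ≤ pDD) (he : 1 ≤ eDD) :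
    battleLoop pDD eDD p e he = some false ↔ 0 < p ∧ 0 < e ∧ ceilDiv p eDD < ceilDiv e pDD := by
  fun_induction battleLoop pDD eDD p e he with
  | case1 p e h htrue =>
      simp only [Option.some.injEq, Bool.true_eq_false, false_iff]
      rintro ⟨hp0, he0, hlt⟩
      have h1 : ceilDiv e pDD = 1 := ceilDiv_eq_one e pDD (by omega) (by omega)
      have h2 : 1 ≤ ceilDiv p eDD := ceilDiv_pos p eDD (by omega) (by omega)
      omega
  | case2 p e h h1 h2 =>
      simp only [true_iff]
      refine ⟨by omega, by omega, ?_⟩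
      have ha : ceilDiv p eDD = 1 := ceilDiv_eq_one p eDD (by omega) (by omega)
      have hb : 2 ≤ ceilDiv e pDD := ceilDiv_ge_two e pDD (by omega) (by omega)
      omega
  | case3 p e h h1 h2 ih =>
      rw [ih]
      have s1 : ceilDiv (p - eDD) eDD = ceilDiv p eDD - 1 := ceilDiv_shift p eDD (by omega)
      have s2 : ceilDiv (e - pDD) pDD = ceilDiv e pDD - 1 := ceilDiv_shift e pDD (by omega)
      constructor <;> rintro ⟨x1, x2, x3⟩ <;> exact ⟨by omega, by omega, by omega⟩
  | case4 p e h =>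
      simp only [reduceCtorEq, false_iff]
      rintro ⟨hp0, he0, _⟩
      exact h ⟨hp0, he0⟩

theorem battle_false_iff (pHp pd pa eHp ed ea : Int) :
    battle pHp pd pa eHp ed ea = some false ↔
      0 < pHp ∧ 0 < eHp ∧ ceilDiv pHp (max (ed - pa) 1) < ceilDiv eHp (max (pd - ea) 1) := by
  unfold battle
  rw [battleLoop_false_iff _ _ _ _ (by split <;> omega) _]
  rw [show (if pd - ea ≤ 1 then (1:Int) else pd - ea) = max (pd - ea) 1 from by split <;> omega]
  rw [show (if ed - pa ≤ 1 then (1:Int) else ed - pa) = max (ed - pa) 1 from by split <;> omega]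

-- common normal form of the two programs: nested folds over the association lists
abbrev lossCond (eHp eDam eArm pHp pDam pArm : Int) (wv av r1v r2v : List Int) : Prop :=
  0 < pHp ∧ 0 < eHp ∧
  ceilDiv pHp (max (eDam - (pArm + pyIdx av 2 + pyIdx r1v 2 + pyIdx r2v 2)) 1) <
  ceilDiv eHp (max (pDam + pyIdx wv 1 + pyIdx r1v 1 + pyIdx r2v 1 - eArm) 1)

def core (w a r : List (String × List Int)) (eHp eDam eArm pHp pDam pArm : Int) : Int :=
  w.foldl (fun best wp =>
    a.foldl (fun best ap =>
      r.foldl (fun best r1 =>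
        r.foldl (fun best r2 =>
          if r1.1 ≠ r2.1 ∧ lossCond eHp eDam eArm pHp pDam pArm wp.2 ap.2 r1.2 r2.2 then
            max best (pyIdx wp.2 0 + pyIdx ap.2 0 + pyIdx r1.2 0 + pyIdx r2.2 0)
          else best) best) best) best) 0

theorem A_eq_core (w a r : List (String × List Int)) (eHp eDam eArm pHp pDam pArm : Int)
    (hw : (w.map Prod.fst).Nodup) (ha : (a.map Prod.fst).Nodup) (hr : (r.map Prod.fst).Nodup) :
    highestLossCost w a r eHp eDam eArm pHp pDam pArm = core w a r eHp eDam eArm pHp pDam pArm := by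
  unfold highestLossCost core
  simp only [PySem.Dict.keys_mk, List.foldl_map]
  refine PySem.List.foldl_congr_mem' _ _ _ _ (fun wp hwp best => ?_)
  have hwv : (PySem.Dict.mk w).getD wp.1 [] = wp.2 :=
    PySem.Dict.getD_of_mem_items _ (by simpa using hwp) (by simpa [PySem.Dict.keys] using hw) []
  simp only [hwv]
  refine PySem.List.foldl_congr_mem' _ _ _ _ (fun ap hap b => ?_)
  have hav : (PySem.Dict.mk a).getD ap.1 [] = ap.2 :=
    PySem.Dict.getD_of_mem_items _ (by simpa using hap) (by simpa [PySem.Dict.keys] using ha) []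
  simp only [hav]
  refine PySem.List.foldl_congr_mem' _ _ _ _ (fun r1 hr1 b2 => ?_)
  have hr1v : (PySem.Dict.mk r).getD r1.1 [] = r1.2 :=
    PySem.Dict.getD_of_mem_items _ (by simpa using hr1) (by simpa [PySem.Dict.keys] using hr) []
  simp only [hr1v]
  refine PySem.List.foldl_congr_mem' _ _ _ _ (fun r2 hr2 b3 => ?_)
  have hr2v : (PySem.Dict.mk r).getD r2.1 [] = r2.2 :=
    PySem.Dict.getD_of_mem_items _ (by simpa using hr2) (by simpa [PySem.Dict.keys] using hr) []
  simp only [hr2v]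
  by_cases hne : r1.1 = r2.1
  · simp [hne]
  · simp only [battle_false_iff, lossCond]
    by_cases hC : 0 < pHp ∧ 0 < eHp ∧
        ceilDiv pHp (max (eDam - (pArm + pyIdx ap.2 2 + pyIdx r1.2 2 + pyIdx r2.2 2)) 1) <
        ceilDiv eHp (max (pDam + pyIdx wp.2 1 + pyIdx r1.2 1 + pyIdx r2.2 1 - eArm) 1)
    · simp only [hne, hC, Ne, not_false_iff, and_self, if_pos]
      split <;> omega
    · simp [hne, hC]

theorem foldl_zip_maps {α : Type} (l : List α) (c k s : α → Int)
    (F : Int → Int × Int × Int → Int) (b : Int) :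
    ((l.map c).zip ((l.map k).zip (l.map s))).foldl F b
      = l.foldl (fun b x => F b (c x, k x, s x)) b := by
  induction l generalizing b with
  | nil => rfl
  | cons x xs ih => simp only [List.map_cons, List.zip_cons_cons, List.foldl_cons, ih]

theorem B_eq_core (w a r : List (String × List Int)) (eHp eDam eArm pHp pDam pArm : Int)
    (hg : ¬(pHp ≤ 0 ∨ eHp ≤ 0 ∨ w = [] ∨ a = [] ∨ r.length < 2)) :
    highestLossCost_alt w a r eHp eDam eArm pHp pDam pArm = core w a r eHp eDam eArm pHp pDam pArm := by
  unfold highestLossCost_alt core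
  rw [if_neg hg]
  simp only [PySem.Dict.values_mk, List.foldl_map, foldl_zip_maps, List.foldl_flatMap,
    ← PySem.List.foldl_if_eq_foldl_filter]
  refine PySem.List.foldl_congr_mem' _ _ _ _ (fun wp hwp best => ?_)
  refine PySem.List.foldl_congr_mem' _ _ _ _ (fun ap hap b => ?_)
  refine PySem.List.foldl_congr_mem' _ _ _ _ (fun r1 hr1 b2 => ?_)
  refine PySem.List.foldl_congr_mem' _ _ _ _ (fun r2 hr2 b3 => ?_)
  by_cases hne : r1.1 = r2.1
  · simp [hne, lossCond]
  · rw [if_pos (by simpa [bne_iff_ne] using hne)]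
    have e1 : eDam - pArm - pyIdx ap.2 2 - (pyIdx r1.2 2 + pyIdx r2.2 2)
        = eDam - (pArm + pyIdx ap.2 2 + pyIdx r1.2 2 + pyIdx r2.2 2) := by ring
    have e2 : pDam + pyIdx wp.2 1 + (pyIdx r1.2 1 + pyIdx r2.2 1) - eArm
        = pDam + pyIdx wp.2 1 + pyIdx r1.2 1 + pyIdx r2.2 1 - eArm := by ring
    have e3 : pyIdx wp.2 0 + pyIdx ap.2 0 + (pyIdx r1.2 0 + pyIdx r2.2 0)
        = pyIdx wp.2 0 + pyIdx ap.2 0 + pyIdx r1.2 0 + pyIdx r2.2 0 := by ring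
    rw [e1, e2, e3]
    unfold lossCond
    simp only [gt_iff_lt]
    by_cases hC : ceilDiv pHp (max (eDam - (pArm + pyIdx ap.2 2 + pyIdx r1.2 2 + pyIdx r2.2 2)) 1) <
        ceilDiv eHp (max (pDam + pyIdx wp.2 1 + pyIdx r1.2 1 + pyIdx r2.2 1 - eArm) 1)
    · have hp0 : 0 < pHp := by omega
      have he0 : 0 < eHp := by omega
      rw [if_pos hC, if_pos (And.intro hne (And.intro hp0 (And.intro he0 hC)))]
      split <;> omega
    · rw [if_neg hC, if_neg (by rintro ⟨_, _, _, h⟩; exact hC h)]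

theorem core_eq_zero (w a r : List (String × List Int)) (eHp eDam eArm pHp pDam pArm : Int)
    (h : ∀ wp ∈ w, ∀ ap ∈ a, ∀ r1 ∈ r, ∀ r2 ∈ r,
      ¬(r1.1 ≠ r2.1 ∧ lossCond eHp eDam eArm pHp pDam pArm wp.2 ap.2 r1.2 r2.2)) :
    core w a r eHp eDam eArm pHp pDam pArm = 0 := by
  unfold core
  refine Eq.trans (PySem.List.foldl_congr_mem' _ _ (fun acc _ => acc) _ (fun wp hwp best => ?_))
    (PySem.List.foldl_ignore _ _)
  refine Eq.trans (PySem.List.foldl_congr_mem' _ _ (fun acc _ => acc) _ (fun ap hap b => ?_))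
    (PySem.List.foldl_ignore _ _)
  refine Eq.trans (PySem.List.foldl_congr_mem' _ _ (fun acc _ => acc) _ (fun r1 hr1 b2 => ?_))
    (PySem.List.foldl_ignore _ _)
  refine Eq.trans (PySem.List.foldl_congr_mem' _ _ (fun acc _ => acc) _ (fun r2 hr2 b3 => ?_))
    (PySem.List.foldl_ignore _ _)
  exact if_neg (h wp hwp ap hap r1 hr1 r2 hr2)

-- ===== VERDICT (by name: the statement is the Claim_ definition above) =====
theorem highestLossCost_spec : Claim_equal_highestLossCost := by
  intro w a r eHp eDam eArm pHp pDam pArm _hdom hpre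
  obtain ⟨hw, ha, hr, _hlen⟩ := hpre
  unfold Spec_highestLossCost
  rw [A_eq_core w a r eHp eDam eArm pHp pDam pArm hw ha hr]
  by_cases hg : pHp ≤ 0 ∨ eHp ≤ 0 ∨ w = [] ∨ a = [] ∨ r.length < 2
  · rw [show highestLossCost_alt w a r eHp eDam eArm pHp pDam pArm = 0 from by
      unfold highestLossCost_alt; rw [if_pos hg]]
    rcases hg with h | h | h | h | h
    · exact core_eq_zero _ _ _ _ _ _ _ _ _ (by rintro _ _ _ _ _ _ _ _ ⟨_, h1, _, _⟩; omega)
    · exact core_eq_zero _ _ _ _ _ _ _ _ _ (by rintro _ _ _ _ _ _ _ _ ⟨_, _, h2, _⟩; omega)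
    · subst h; rfl
    · subst h
      exact Eq.trans (PySem.List.foldl_congr_mem' _ _ (fun acc _ => acc) _
        (fun wp hwp best => rfl)) (PySem.List.foldl_ignore _ _)
    · match r, h with
      | [], _ =>
        exact Eq.trans (PySem.List.foldl_congr_mem' _ _ (fun acc _ => acc) _
          (fun wp hwp best => Eq.trans (PySem.List.foldl_congr_mem' _ _ (fun acc _ => acc) _
            (fun ap hap b => rfl)) (PySem.List.foldl_ignore _ _))) (PySem.List.foldl_ignore _ _)
      | [x], _ =>
        refine core_eq_zero _ _ _ _ _ _ _ _ _ ?_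
        rintro _ _ _ _ r1 hr1 r2 hr2 ⟨hne, _⟩
        simp only [List.mem_singleton] at hr1 hr2
        subst hr1; subst hr2; exact hne rfl
  · exact (B_eq_core w a r eHp eDam eArm pHp pDam pArm hg).symm
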